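-- pv_equiv track=rewrite | github.com/yjh4124/algorithm_yjh | 백준/Gold/2637. 장난감 조립/장난감 조립.py | get_product_costs
-- ===== SOURCE A (Python) =====
-- from collections import deque
--
-- def get_product_costs(num_parts, dependencies):
--     graph = [[] for _ in range(num_parts + 1)]
--     indegree = [0] * (num_parts + 1)
--
--     # 상위 부품과 하위 부품 간의 의존성 그래프 설정
--     for part, base, qty in dependencies:
--         graph[base].append((part, qty))
--         indegree[part] += 1
--
--     # 기본 부품 찾기
--     base_parts = [i for i in range(1, num_parts + 1) if indegree[i] == 0]
--     num_base_parts = len(base_parts)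
--
--     queue = deque(base_parts)
--
--     # 각 부품의 기본 부품 비용을 저장하는 배열
--     cost = [[0] * num_base_parts for _ in range(num_parts + 1)]
--
--     # 기본 부품의 초기 비용 설정
--     for idx, part in enumerate(base_parts):
--         cost[part][idx] = 1
--
--     # 위상 정렬을 사용한 부품 비용 계산
--     while queue:
--         current_part = queue.popleft()
--
--         for next_part, qty in graph[current_part]:
--             for idx in range(num_base_parts):
--                 cost[next_part][idx] += cost[current_part][idx] * qty
--             indegree[next_part] -= 1
--             if indegree[next_part] == 0:
--                 queue.append(next_part)
--
--     result = [(base_parts[idx], cost[num_parts][idx]) for idx in range(num_base_parts)]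
--     return result
-- ===== SOURCE B (Python) =====
-- from collections import deque
--
-- def get_product_costs(num_parts, dependencies):
--     graph = [[] for _ in range(num_parts + 1)]
--     indegree = [0] * (num_parts + 1)
--     for part, base, qty in dependencies:
--         graph[base].append((part, qty))
--         indegree[part] += 1
--
--     base_parts = [i for i in range(1, num_parts + 1) if indegree[i] == 0]
--
--     # Kahn's algorithm: record the topological order of the buildable parts.
--     order = []
--     queue = deque(base_parts)
--     while queue:
--         v = queue.popleft()
--         order.append(v)
--         for nxt, _ in graph[v]:
--             indegree[nxt] -= 1
--             if indegree[nxt] == 0: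
--                 queue.append(nxt)
--
--     # One backward pass: need[v] = copies of part v consumed per finished product.
--     need = [0] * (num_parts + 1)
--     need[num_parts] = 1
--     for v in reversed(order):
--         need[v] += sum(qty * need[nxt] for nxt, qty in graph[v])
--     return [(b, need[b]) for b in base_parts]
-- ===== Notes on version B (the rewrite author's own statement) =====
-- stated objective: faster
-- what changed: Replaces the per-node VECTOR of per-base-part counts propagated during Kahn's BFS with a plain toposort followed by a single backward pass computing one scalar need-count per node; Pre_ excludes inputs where A raises IndexError (dependency label outside the arrays' index range) and negative num_parts, where A returns [] but B's natural need[num_parts] = 1 write raises IndexError.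
-- outside the precondition, e.g. on get_product_costs(-1, []): A returns [], B raises IndexError
import Mathlib
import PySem

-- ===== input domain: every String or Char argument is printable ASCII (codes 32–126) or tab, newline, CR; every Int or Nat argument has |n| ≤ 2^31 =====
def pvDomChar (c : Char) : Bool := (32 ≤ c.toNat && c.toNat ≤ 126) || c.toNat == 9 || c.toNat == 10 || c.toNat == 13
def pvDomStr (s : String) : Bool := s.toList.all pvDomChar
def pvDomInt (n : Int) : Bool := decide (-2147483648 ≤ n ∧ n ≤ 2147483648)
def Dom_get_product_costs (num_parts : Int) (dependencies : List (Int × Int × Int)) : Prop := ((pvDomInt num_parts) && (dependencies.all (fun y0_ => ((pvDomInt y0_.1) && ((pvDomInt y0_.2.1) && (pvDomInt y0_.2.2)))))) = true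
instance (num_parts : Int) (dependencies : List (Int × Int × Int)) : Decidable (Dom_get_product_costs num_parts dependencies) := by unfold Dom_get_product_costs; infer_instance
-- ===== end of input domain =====

-- B replaces A's Kahn BFS propagating a per-node VECTOR of per-base-part counts by a plain
-- toposort followed by ONE backward pass computing a single scalar need-count per node.

-- ===== PORT A =====
-- inner edge-relaxation step of the BFS loop ('for next_part, qty in graph[current_part]')
def pvStepA (nb : Int) (u : Int) (st : List Int × List Int × List (List Int)) (pq : Int × Int) :
    List Int × List Int × List (List Int) :=
  let cs' := (PySem.List.pyRange 0 nb 1).foldl (fun c i =>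
      PySem.List.pySetD c pq.1 (PySem.List.pySetD (PySem.List.pyGetD c pq.1 []) i
        (PySem.List.pyGetD (PySem.List.pyGetD c pq.1 []) i 0
          + PySem.List.pyGetD (PySem.List.pyGetD c u []) i 0 * pq.2))) st.2.2
  let dg' := PySem.List.pySetD st.2.1 pq.1 (PySem.List.pyGetD st.2.1 pq.1 0 - 1)
  let qu' := if PySem.List.pyGetD dg' pq.1 0 = 0 then st.1 ++ [pq.1] else st.1
  (qu', dg', cs')

-- 'while queue:' loop; the fuel bounds the number of pops
def pvBfsA (g : List (List (Int × Int))) (nb : Int) :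
    Nat → List Int → List Int → List (List Int) → List (List Int)
  | 0, _, _, cs => cs
  | _ + 1, [], _, cs => cs
  | fuel + 1, u :: qs, dg, cs =>
    let st := (PySem.List.pyGetD g u []).foldl (pvStepA nb u) (qs, dg, cs)
    pvBfsA g nb fuel st.1 st.2.1 st.2.2

-- the 'graph'/'indegree' building loop (textually identical in Source A and Source B; shared helper)
def pvBuildA (num_parts : Int) (dependencies : List (Int × Int × Int)) :
    List (List (Int × Int)) × List Int :=
  dependencies.foldl (fun gd e =>
      (PySem.List.pySetD gd.1 e.2.1 (PySem.List.pyGetD gd.1 e.2.1 [] ++ [(e.1, e.2.2)]),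
       PySem.List.pySetD gd.2 e.1 (PySem.List.pyGetD gd.2 e.1 0 + 1)))
    (List.replicate (num_parts + 1).toNat [], List.replicate (num_parts + 1).toNat 0)

def get_product_costs (num_parts : Int) (dependencies : List (Int × Int × Int)) : List (Int × Int) :=
  let gd := pvBuildA num_parts dependencies
  let bp := (PySem.List.pyRange 1 (num_parts + 1) 1).filter
      (fun i => PySem.List.pyGetD gd.2 i 0 == 0)
  let cost0 : List (List Int) :=
    List.replicate (num_parts + 1).toNat (List.replicate bp.length 0)
  let cost1 := (PySem.List.enumerate bp 0).foldl (fun c ip =>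
      PySem.List.pySetD c ip.2 (PySem.List.pySetD (PySem.List.pyGetD c ip.2 []) ip.1 1)) cost0
  let costF := pvBfsA gd.1 (bp.length : Int) (num_parts.toNat + dependencies.length + 1) bp gd.2 cost1
  (PySem.List.pyRange 0 (bp.length : Int) 1).map (fun idx =>
      (PySem.List.pyGetD bp idx 0,
       PySem.List.pyGetD (PySem.List.pyGetD costF num_parts []) idx 0))

-- ===== PORT B =====
-- per-edge step of B's Kahn loop ('indegree[nxt] -= 1; if indegree[nxt] == 0: queue.append')
def pvStepB (st : List Int × List Int) (pq : Int × Int) : List Int × List Int :=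
  let dg' := PySem.List.pySetD st.2 pq.1 (PySem.List.pyGetD st.2 pq.1 0 - 1)
  (if PySem.List.pyGetD dg' pq.1 0 = 0 then st.1 ++ [pq.1] else st.1, dg')

-- B's 'while queue:' loop, recording the topological order of pops
def pvBfsB (g : List (List (Int × Int))) :
    Nat → List Int → List Int → List Int → List Int
  | 0, _, _, ord => ord
  | _ + 1, [], _, ord => ord
  | fuel + 1, v :: qs, dg, ord =>
    let st := (PySem.List.pyGetD g v []).foldl pvStepB (qs, dg)
    pvBfsB g fuel st.1 st.2 (ord ++ [v])

def get_product_costs_alt (num_parts : Int) (dependencies : List (Int × Int × Int)) : List (Int × Int) :=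
  let gd := pvBuildA num_parts dependencies
  let bp := (PySem.List.pyRange 1 (num_parts + 1) 1).filter
      (fun i => PySem.List.pyGetD gd.2 i 0 == 0)
  let ord := pvBfsB gd.1 (num_parts.toNat + dependencies.length + 1) bp gd.2 []
  let need0 := PySem.List.pySetD (List.replicate (num_parts + 1).toNat (0 : Int)) num_parts 1
  let need := ord.reverse.foldl (fun nd v =>
      PySem.List.pySetD nd v (PySem.List.pyGetD nd v 0 +
        ((PySem.List.pyGetD gd.1 v []).map
          (fun pq => pq.2 * PySem.List.pyGetD nd pq.1 0)).sum)) need0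
  bp.map (fun b => (b, PySem.List.pyGetD need b 0))

-- ===== PRECONDITION & SPEC =====
-- Pre_ excludes exactly (a) inputs where A raises IndexError (a dependency label outside
-- Python's index range of the length-(num_parts+1) arrays), and (b) negative num_parts,
-- where A returns [] but B's natural 'need[num_parts] = 1' write raises IndexError.
def Pre_get_product_costs (num_parts : Int) (dependencies : List (Int × Int × Int)) : Prop :=
  0 ≤ num_parts ∧ ∀ e ∈ dependencies, -(num_parts + 1) ≤ e.1 ∧ e.1 ≤ num_parts ∧
    -(num_parts + 1) ≤ e.2.1 ∧ e.2.1 ≤ num_parts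
instance (num_parts : Int) (dependencies : List (Int × Int × Int)) : Decidable (Pre_get_product_costs num_parts dependencies) := by unfold Pre_get_product_costs; infer_instance

def pvWitness_get_product_costs : Int × (List (Int × Int × Int)) :=
  (3, [(3, 1, 2), (3, 2, 4), (2, 1, 1)])

def Spec_get_product_costs (num_parts : Int) (dependencies : List (Int × Int × Int)) (out : List (Int × Int)) : Prop := out = get_product_costs_alt num_parts dependencies
instance (num_parts : Int) (dependencies : List (Int × Int × Int)) (out : List (Int × Int)) : Decidable (Spec_get_product_costs num_parts dependencies out) := by unfold Spec_get_product_costs; infer_instance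

-- ===== CLAIM (what is proved, stated in full; the proofs are below) =====
def Claim_equal_get_product_costs : Prop := ∀ (num_parts : Int) (dependencies : List (Int × Int × Int)), Dom_get_product_costs num_parts dependencies → Pre_get_product_costs num_parts dependencies → Spec_get_product_costs num_parts dependencies (get_product_costs num_parts dependencies)

-- ===== LEMMAS AND PROOFS =====

-- canonical index of a (possibly negative, Python-wrapping) node label
def pvSz (n : Int) : Nat := (n + 1).toNat
def pvIdx (n v : Int) : Nat := (if v < 0 then v + (n + 1) else v).toNat
def pvInb (n v : Int) : Prop := -(n + 1) ≤ v ∧ v ≤ n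
def pvPreE (n : Int) (deps : List (Int × Int × Int)) : Prop :=
  ∀ e ∈ deps, pvInb n e.1 ∧ pvInb n e.2.1
-- out-edges of canonical node w (entries keep the raw part labels)
def pvRowF (n : Int) (deps : List (Int × Int × Int)) (w : Nat) : List (Int × Int) :=
  (deps.filter (fun e => pvIdx n e.2.1 == w)).map (fun e => (e.1, e.2.2))
-- number of not-yet-relaxed edges into w, given the list of already-popped canonical nodes
def pvCnt (n : Int) (deps : List (Int × Int × Int)) (w : Nat) (done : List Nat) : Nat :=
  deps.countP (fun e => pvIdx n e.1 == w && decide (pvIdx n e.2.1 ∉ done))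
-- edges into w among a pending edge list
def pvPend (n : Int) (es : List (Int × Int)) (w : Nat) : Nat :=
  es.countP (fun pq => pvIdx n pq.1 == w)
-- total qty-weight of edges of es targeting canonical node y
def pvRowW (n : Int) (es : List (Int × Int)) (y : Nat) : Int :=
  ((es.filter (fun pq => pvIdx n pq.1 == y)).map (fun pq => pq.2)).sum
def pvG2 (cost : List (List Int)) (w i : Nat) : Int := (cost.getD w []).getD i 0
-- A's base_parts list, in spec terms
def pvBP (n : Int) (deps : List (Int × Int × Int)) : List Int :=
  (PySem.List.pyRange 1 (n + 1) 1).filter (fun v => pvCnt n deps v.toNat [] == 0)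

-- the shared queue/indegree dynamics of one pop's edge relaxations
def pvRelaxQ (es : List (Int × Int)) (qd : List Int × List Int) : List Int × List Int :=
  es.foldl pvStepB qd
-- the pop sequence of the shared Kahn loop
def pvPops (g : List (List (Int × Int))) : Nat → List Int → List Int → List Int
  | 0, _, _ => []
  | _ + 1, [], _ => []
  | fuel + 1, v :: qs, dg =>
    v :: pvPops g fuel (pvRelaxQ (PySem.List.pyGetD g v []) (qs, dg)).1
        (pvRelaxQ (PySem.List.pyGetD g v []) (qs, dg)).2
-- the cost relaxation of one edge (A's inner 'for idx in range(num_base_parts)' loop)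
def pvEdgeC (nb : Int) (u : Int) (cs : List (List Int)) (pq : Int × Int) : List (List Int) :=
  (PySem.List.pyRange 0 nb 1).foldl (fun c i =>
      PySem.List.pySetD c pq.1 (PySem.List.pySetD (PySem.List.pyGetD c pq.1 []) i
        (PySem.List.pyGetD (PySem.List.pyGetD c pq.1 []) i 0
          + PySem.List.pyGetD (PySem.List.pyGetD c u []) i 0 * pq.2))) cs

-- a well-formed Kahn run: each popped node is fresh and its out-edges target
-- only nodes that are neither already popped nor the node itself
def pvRunOK (n : Int) (deps : List (Int × Int × Int)) : List Nat → List Int → Prop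
  | _, [] => True
  | P, u :: L => pvInb n u ∧ pvIdx n u ∉ P ∧
      (∀ pq ∈ pvRowF n deps (pvIdx n u),
        pvInb n pq.1 ∧ pvIdx n pq.1 ∉ P ∧ pvIdx n pq.1 ≠ pvIdx n u) ∧
      pvRunOK n deps (P ++ [pvIdx n u]) L

-- ——— basic index lemmas ———
lemma pvIdx_lt {n v : Int} (hn : 0 ≤ n) (h : pvInb n v) : pvIdx n v < pvSz n := by
  unfold pvIdx pvSz; rcases h with ⟨h1, h2⟩; split <;> omega

lemma pvIdx_nonneg_eq {n v : Int} (h : 0 ≤ v) : pvIdx n v = v.toNat := by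
  unfold pvIdx; split <;> omega

lemma pvGetD_idx {α : Type} {n : Int} (hn : 0 ≤ n) (xs : List α) (v : Int) (d : α)
    (hl : xs.length = pvSz n) (hv : pvInb n v) :
    PySem.List.pyGetD xs v d = xs.getD (pvIdx n v) d := by
  rcases hv with ⟨h1, h2⟩
  simp only [PySem.List.pyGetD, PySem.List.pyGet?, PySem.List.pyIdx?, hl, pvSz, pvIdx]
  by_cases h0 : 0 ≤ v
  · rw [if_pos h0, if_pos (by omega), if_neg (by omega)]
    simp [List.getD]
  · rw [if_neg h0, if_pos (by omega), if_pos (by omega)]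
    have : (n + 1).toNat - (-v).toNat = (v + (n + 1)).toNat := by omega
    simp [List.getD, this]

lemma pvSetD_idx {α : Type} {n : Int} (hn : 0 ≤ n) (xs : List α) (v : Int) (a : α)
    (hl : xs.length = pvSz n) (hv : pvInb n v) :
    PySem.List.pySetD xs v a = xs.set (pvIdx n v) a := by
  rcases hv with ⟨h1, h2⟩
  simp only [PySem.List.pySetD, PySem.List.pySet?, PySem.List.pyIdx?, hl, pvSz, pvIdx]
  by_cases h0 : 0 ≤ v
  · rw [if_pos h0, if_pos (by omega), if_neg (by omega)]
    simp
  · rw [if_neg h0, if_pos (by omega), if_pos (by omega)]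
    have : (n + 1).toNat - (-v).toNat = (v + (n + 1)).toNat := by omega
    simp [this]

lemma pvGetD_set {α : Type} (xs : List α) (k w : Nat) (v d : α) (hk : k < xs.length) :
    (xs.set k v).getD w d = if w = k then v else xs.getD w d := by
  by_cases h : w = k
  · subst h
    simp [List.getD, List.getElem?_set_self', hk]
  · simp [List.getD, List.getElem?_set_ne (by omega : k ≠ w), h]

lemma pvG2_set_row (cost : List (List Int)) (k : Nat) (row : List Int) (y i : Nat)
    (hk : k < cost.length) :
    pvG2 (cost.set k row) y i = if y = k then row.getD i 0 else pvG2 cost y i := by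
  unfold pvG2
  rw [pvGetD_set cost k y row [] hk]
  split <;> rfl

-- ——— counting lemmas ———
lemma pvCountP_split {α : Type} (l : List α) (p q r : α → Bool)
    (h : ∀ a ∈ l, (if p a then 1 else 0) = ((if q a then 1 else 0) + (if r a then 1 else 0) : Nat)) :
    l.countP p = l.countP q + l.countP r := by
  induction l with
  | nil => simp
  | cons a t ih =>
    have ha := h a (by simp)
    have ht := ih (fun b hb => h b (by simp [hb]))
    by_cases hp : p a <;> by_cases hq : q a <;> by_cases hr : r a <;>
      simp [List.countP_cons, hp, hq, hr, ht] at ha ⊢ <;> omega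

lemma pvPend_rowF {n : Int} {deps : List (Int × Int × Int)} (w x : Nat) :
    pvPend n (pvRowF n deps w) x
      = deps.countP (fun e => pvIdx n e.1 == x && pvIdx n e.2.1 == w) := by
  unfold pvPend pvRowF
  rw [List.countP_map, List.countP_filter]
  apply List.countP_congr
  intro e _
  simp [Function.comp, Bool.and_comm]

lemma pvCnt_snoc {n : Int} {deps : List (Int × Int × Int)} {w : Nat} {done : List Nat}
    (hw : w ∉ done) (x : Nat) :
    pvCnt n deps x done = pvCnt n deps x (done ++ [w]) + pvPend n (pvRowF n deps w) x := by
  rw [pvPend_rowF]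
  unfold pvCnt
  apply pvCountP_split
  intro e _
  by_cases h1 : pvIdx n e.1 = x <;> by_cases h2 : pvIdx n e.2.1 = w <;>
    by_cases h3 : pvIdx n e.2.1 ∈ done <;>
    simp [h1, h2, h3, List.mem_append] <;> simp_all

lemma pvCnt_zero {n : Int} {deps : List (Int × Int × Int)} {x : Nat} {done : List Nat}
    (h : pvCnt n deps x done = 0) :
    ∀ e ∈ deps, pvIdx n e.1 = x → pvIdx n e.2.1 ∈ done := by
  unfold pvCnt at h
  rw [List.countP_eq_zero] at h
  intro e he h1
  have := h e he
  simp [h1] at this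
  exact this

lemma pvPend_cons {n : Int} (pq : Int × Int) (es : List (Int × Int)) (y : Nat) :
    pvPend n (pq :: es) y = (if pvIdx n pq.1 = y then 1 else 0) + pvPend n es y := by
  unfold pvPend
  by_cases h : pvIdx n pq.1 = y <;> simp [List.countP_cons, h] <;> omega

lemma pvRowW_cons {n : Int} (pq : Int × Int) (es : List (Int × Int)) (y : Nat) :
    pvRowW n (pq :: es) y = (if pvIdx n pq.1 = y then pq.2 else 0) + pvRowW n es y := by
  unfold pvRowW
  by_cases h : pvIdx n pq.1 = y <;> simp [List.filter_cons, h]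

lemma pvRowW_zero {n : Int} {es : List (Int × Int)} {y : Nat}
    (h : ∀ pq ∈ es, pvIdx n pq.1 ≠ y) : pvRowW n es y = 0 := by
  unfold pvRowW
  have : es.filter (fun pq => pvIdx n pq.1 == y) = [] := by
    rw [List.filter_eq_nil_iff]
    intro pq hpq
    simp [h pq hpq]
  rw [this]
  simp

-- ——— membership facts about rows ———
lemma pvRowF_mem {n : Int} {deps : List (Int × Int × Int)} {w : Nat} {pq : Int × Int}
    (hpq : pq ∈ pvRowF n deps w) :
    ∃ e ∈ deps, e.1 = pq.1 ∧ e.2.2 = pq.2 ∧ pvIdx n e.2.1 = w := by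
  unfold pvRowF at hpq
  obtain ⟨e, he, hee⟩ := List.mem_map.mp hpq
  obtain ⟨he1, he2⟩ := List.mem_filter.mp he
  refine ⟨e, he1, ?_, ?_, by simpa using he2⟩
  · rw [← hee]
  · rw [← hee]

lemma pvRowF_inb {n : Int} {deps : List (Int × Int × Int)} (hp : pvPreE n deps) {w : Nat}
    {pq : Int × Int} (hpq : pq ∈ pvRowF n deps w) : pvInb n pq.1 := by
  obtain ⟨e, he, h1, _, _⟩ := pvRowF_mem hpq
  have := hp e he
  rw [← h1]
  exact this.1

lemma pvRowF_cons {n : Int} (e : Int × Int × Int) (ds : List (Int × Int × Int)) (w : Nat) :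
    pvRowF n (e :: ds) w
      = (if pvIdx n e.2.1 = w then [(e.1, e.2.2)] else []) ++ pvRowF n ds w := by
  unfold pvRowF
  by_cases h : pvIdx n e.2.1 = w <;> simp [List.filter_cons, h]

lemma pvCnt_cons {n : Int} (e : Int × Int × Int) (ds : List (Int × Int × Int)) (w : Nat) :
    pvCnt n (e :: ds) w [] = (if pvIdx n e.1 = w then 1 else 0) + pvCnt n ds w [] := by
  unfold pvCnt
  by_cases h : pvIdx n e.1 = w <;> simp [List.countP_cons, h] <;> omega

-- ——— the build loop, in spec terms ———
lemma pvBuildA_go {n : Int} (hn : 0 ≤ n) :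
    ∀ (ds : List (Int × Int × Int)) (g : List (List (Int × Int))) (d : List Int),
      pvPreE n ds → g.length = pvSz n → d.length = pvSz n →
      (ds.foldl (fun gd e =>
        (PySem.List.pySetD gd.1 e.2.1 (PySem.List.pyGetD gd.1 e.2.1 [] ++ [(e.1, e.2.2)]),
         PySem.List.pySetD gd.2 e.1 (PySem.List.pyGetD gd.2 e.1 0 + 1))) (g, d)).1.length = pvSz n ∧
      (ds.foldl (fun gd e =>
        (PySem.List.pySetD gd.1 e.2.1 (PySem.List.pyGetD gd.1 e.2.1 [] ++ [(e.1, e.2.2)]),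
         PySem.List.pySetD gd.2 e.1 (PySem.List.pyGetD gd.2 e.1 0 + 1))) (g, d)).2.length = pvSz n ∧
      (∀ w : Nat, (ds.foldl (fun gd e =>
        (PySem.List.pySetD gd.1 e.2.1 (PySem.List.pyGetD gd.1 e.2.1 [] ++ [(e.1, e.2.2)]),
         PySem.List.pySetD gd.2 e.1 (PySem.List.pyGetD gd.2 e.1 0 + 1))) (g, d)).1.getD w []
          = g.getD w [] ++ pvRowF n ds w) ∧
      (∀ w : Nat, (ds.foldl (fun gd e =>
        (PySem.List.pySetD gd.1 e.2.1 (PySem.List.pyGetD gd.1 e.2.1 [] ++ [(e.1, e.2.2)]),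
         PySem.List.pySetD gd.2 e.1 (PySem.List.pyGetD gd.2 e.1 0 + 1))) (g, d)).2.getD w 0
          = d.getD w 0 + (pvCnt n ds w [] : Int)) := by
  intro ds
  induction ds with
  | nil =>
    intro g d _ hg hd
    refine ⟨hg, hd, fun w => by simp [pvRowF], fun w => by simp [pvCnt]⟩
  | cons e ds ih =>
    intro g d hp hg hd
    have hin : pvInb n e.1 ∧ pvInb n e.2.1 := hp e (by simp)
    have hbase := pvIdx_lt hn hin.2
    have hpart := pvIdx_lt hn hin.1
    simp only [List.foldl_cons]
    set g' := PySem.List.pySetD g e.2.1 (PySem.List.pyGetD g e.2.1 [] ++ [(e.1, e.2.2)]) with hg'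
    set d' := PySem.List.pySetD d e.1 (PySem.List.pyGetD d e.1 0 + 1) with hd'
    have hge : g' = g.set (pvIdx n e.2.1) (g.getD (pvIdx n e.2.1) [] ++ [(e.1, e.2.2)]) := by
      rw [hg', pvSetD_idx hn g _ _ hg hin.2, pvGetD_idx hn g _ _ hg hin.2]
    have hde : d' = d.set (pvIdx n e.1) (d.getD (pvIdx n e.1) 0 + 1) := by
      rw [hd', pvSetD_idx hn d _ _ hd hin.1, pvGetD_idx hn d _ _ hd hin.1]
    have hgl : g'.length = pvSz n := by rw [hge, List.length_set]; exact hg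
    have hdl : d'.length = pvSz n := by rw [hde, List.length_set]; exact hd
    have hpds : pvPreE n ds := fun x hx => hp x (by simp [hx])
    obtain ⟨c1, c2, c3, c4⟩ := ih g' d' hpds hgl hdl
    refine ⟨c1, c2, ?_, ?_⟩
    · intro w
      rw [c3 w, pvRowF_cons]
      rw [hge, pvGetD_set g _ w _ [] (by omega)]
      by_cases h : w = pvIdx n e.2.1
      · rw [if_pos h, if_pos h.symm, h]
        simp
      · rw [if_neg h, if_neg (fun hc => h hc.symm)]
        simp
    · intro w
      rw [c4 w, pvCnt_cons]
      rw [hde, pvGetD_set d _ w _ 0 (by omega)]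
      by_cases h : w = pvIdx n e.1
      · subst h
        rw [if_pos rfl, if_pos rfl]
        push_cast
        omega
      · rw [if_neg h, if_neg (fun hc => h hc.symm)]
        push_cast
        omega

lemma pvBuildA_spec {n : Int} {deps : List (Int × Int × Int)} (hn : 0 ≤ n) (hp : pvPreE n deps) :
    (pvBuildA n deps).1.length = pvSz n ∧ (pvBuildA n deps).2.length = pvSz n ∧
    (∀ w : Nat, (pvBuildA n deps).1.getD w [] = pvRowF n deps w) ∧
    (∀ w : Nat, (pvBuildA n deps).2.getD w 0 = (pvCnt n deps w [] : Int)) := by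
  have := pvBuildA_go hn deps (List.replicate (pvSz n) []) (List.replicate (pvSz n) 0) hp
    (by simp) (by simp)
  unfold pvBuildA
  have hrep1 : ∀ w : Nat, (List.replicate (pvSz n) ([] : List (Int × Int))).getD w [] = [] := by
    intro w; by_cases h : w < pvSz n <;> simp [List.getD, List.getElem?_replicate, h]
  have hrep2 : ∀ w : Nat, (List.replicate (pvSz n) (0 : Int)).getD w 0 = 0 := by
    intro w; by_cases h : w < pvSz n <;> simp [List.getD, List.getElem?_replicate, h]
  obtain ⟨c1, c2, c3, c4⟩ := this
  refine ⟨?_, ?_, ?_, ?_⟩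
  · simpa [pvSz] using c1
  · simpa [pvSz] using c2
  · intro w
    have := c3 w
    rw [hrep1 w] at this
    simpa [pvSz] using this
  · intro w
    have := c4 w
    rw [hrep2 w] at this
    simpa [pvSz] using this

-- ——— base_parts, in both ports, equals pvBP ———
lemma pvBP_eq {n : Int} {deps : List (Int × Int × Int)} (hn : 0 ≤ n) (hp : pvPreE n deps) :
    ((PySem.List.pyRange 1 (n + 1) 1).filter
      (fun i => PySem.List.pyGetD (pvBuildA n deps).2 i 0 == 0)) = pvBP n deps := by
  unfold pvBP
  apply List.filter_congr
  intro v hv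
  have hmem := (PySem.List.mem_pyRange_one).mp hv
  have hvb : pvInb n v := ⟨by omega, by omega⟩
  obtain ⟨h1, h2, h3, h4⟩ := pvBuildA_spec hn hp
  rw [pvGetD_idx hn _ _ _ h2 hvb, h4, pvIdx_nonneg_eq (by omega)]
  simp

lemma pvBP_mem {n : Int} {deps : List (Int × Int × Int)} {v : Int} (hv : v ∈ pvBP n deps) :
    1 ≤ v ∧ v ≤ n ∧ pvCnt n deps v.toNat [] = 0 := by
  unfold pvBP at hv
  obtain ⟨h1, h2⟩ := List.mem_filter.mp hv
  have hmem := (PySem.List.mem_pyRange_one).mp h1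
  simp at h2
  exact ⟨by omega, by omega, h2⟩

lemma pvBP_nodup {n : Int} {deps : List (Int × Int × Int)} : (pvBP n deps).Nodup :=
  (PySem.List.nodup_pyRange_one 1 (n + 1)).filter _

lemma pvBP_idx {n : Int} {deps : List (Int × Int × Int)} {v : Int} (hv : v ∈ pvBP n deps) :
    pvIdx n v = v.toNat := pvIdx_nonneg_eq (by have := pvBP_mem hv; omega)

lemma pvBP_map_nodup {n : Int} {deps : List (Int × Int × Int)} :
    ((pvBP n deps).map (pvIdx n)).Nodup := by
  apply List.Nodup.map_on _ pvBP_nodup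
  intro x hx y hy hxy
  have hx1 := pvBP_mem hx
  have hy1 := pvBP_mem hy
  rw [pvBP_idx hx, pvBP_idx hy] at hxy
  omega

-- ——— decomposition of both BFS loops over the pop sequence ———
lemma pvStepA_split (nb : Int) (u : Int) :
    ∀ (es : List (Int × Int)) (qu dg : List Int) (cs : List (List Int)),
      es.foldl (pvStepA nb u) (qu, dg, cs)
        = ((pvRelaxQ es (qu, dg)).1, (pvRelaxQ es (qu, dg)).2, es.foldl (pvEdgeC nb u) cs) := by
  intro es
  induction es with
  | nil => intro qu dg cs; simp [pvRelaxQ]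
  | cons pq t ih =>
    intro qu dg cs
    rw [List.foldl_cons, List.foldl_cons]
    have hstep : pvStepA nb u (qu, dg, cs) pq
        = ((pvStepB (qu, dg) pq).1, (pvStepB (qu, dg) pq).2, pvEdgeC nb u cs pq) := rfl
    rw [hstep, ih]
    simp [pvRelaxQ]

lemma pvBfsA_pops (g : List (List (Int × Int))) (nb : Int) :
    ∀ (fuel : Nat) (qu dg : List Int) (cs : List (List Int)),
      pvBfsA g nb fuel qu dg cs
        = (pvPops g fuel qu dg).foldl
            (fun cs u => (PySem.List.pyGetD g u []).foldl (pvEdgeC nb u) cs) cs := by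
  intro fuel
  induction fuel with
  | zero => intro qu dg cs; simp [pvBfsA, pvPops]
  | succ f ih =>
    intro qu dg cs
    cases qu with
    | nil => simp [pvBfsA, pvPops]
    | cons u qs =>
      show pvBfsA g nb f _ _ _ = _
      rw [pvStepA_split nb u (PySem.List.pyGetD g u []) qs dg cs]
      show pvBfsA g nb f (pvRelaxQ _ (qs, dg)).1 (pvRelaxQ _ (qs, dg)).2
          ((PySem.List.pyGetD g u []).foldl (pvEdgeC nb u) cs) = _
      rw [ih]
      rfl

lemma pvBfsB_pops (g : List (List (Int × Int))) :
    ∀ (fuel : Nat) (qu dg ord : List Int),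
      pvBfsB g fuel qu dg ord = ord ++ pvPops g fuel qu dg := by
  intro fuel
  induction fuel with
  | zero => intro qu dg ord; simp [pvBfsB, pvPops]
  | succ f ih =>
    intro qu dg ord
    cases qu with
    | nil => simp [pvBfsB, pvPops]
    | cons v qs =>
      show pvBfsB g f _ _ _ = _
      have hfold : (PySem.List.pyGetD g v []).foldl pvStepB (qs, dg)
          = pvRelaxQ (PySem.List.pyGetD g v []) (qs, dg) := rfl
      rw [hfold, ih]
      show ord ++ [v] ++ _ = _
      rw [List.append_assoc]
      rfl

-- ——— the queue/indegree invariant of one pop's relaxations ———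
lemma pvRelaxQ_spec {n : Int} {deps : List (Int × Int × Int)} (hn : 0 ≤ n) :
    ∀ (es : List (Int × Int)) (qs dg : List Int) (P : List Nat),
      (∀ pq ∈ es, pvInb n pq.1 ∧ pvIdx n pq.1 ∉ P) →
      (∀ v ∈ qs, pvInb n v) →
      (P ++ qs.map (pvIdx n)).Nodup →
      (∀ v ∈ qs, pvCnt n deps (pvIdx n v) P + pvPend n es (pvIdx n v) = 0) →
      dg.length = pvSz n →
      (∀ x : Nat, dg.getD x 0 = ((pvCnt n deps x P + pvPend n es x : Nat) : Int)) →
      (∀ v ∈ (pvRelaxQ es (qs, dg)).1, pvInb n v) ∧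
      (P ++ (pvRelaxQ es (qs, dg)).1.map (pvIdx n)).Nodup ∧
      (∀ v ∈ (pvRelaxQ es (qs, dg)).1, pvCnt n deps (pvIdx n v) P = 0) ∧
      (pvRelaxQ es (qs, dg)).2.length = pvSz n ∧
      (∀ x : Nat, (pvRelaxQ es (qs, dg)).2.getD x 0 = (pvCnt n deps x P : Int)) := by
  intro es
  induction es with
  | nil =>
    intro qs dg P hes hq1 hq2 hq3 hdl hdg
    simp only [pvRelaxQ, List.foldl_nil]
    refine ⟨hq1, hq2, ?_, hdl, ?_⟩
    · intro v hv
      have := hq3 v hv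
      simp [pvPend] at this
      exact this
    · intro x
      have := hdg x
      simpa [pvPend] using this
  | cons pq t ih =>
    intro qs dg P hes hq1 hq2 hq3 hdl hdg
    have hpq := hes pq (by simp)
    have hib : pvInb n pq.1 := hpq.1
    have htlt := pvIdx_lt hn hib
    have hlen' : (dg.set (pvIdx n pq.1) (dg.getD (pvIdx n pq.1) 0 - 1)).length = pvSz n := by
      rw [List.length_set]; exact hdl
    have hdg0 : PySem.List.pySetD dg pq.1 (PySem.List.pyGetD dg pq.1 0 - 1)
        = dg.set (pvIdx n pq.1) (dg.getD (pvIdx n pq.1) 0 - 1) := by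
      rw [pvGetD_idx hn dg pq.1 0 hdl hib, pvSetD_idx hn dg pq.1 _ hdl hib]
    have hdgx : ∀ x : Nat, (dg.set (pvIdx n pq.1) (dg.getD (pvIdx n pq.1) 0 - 1)).getD x 0
        = ((pvCnt n deps x P + pvPend n t x : Nat) : Int) := by
      intro x
      rw [pvGetD_set dg (pvIdx n pq.1) x _ 0 (by rw [hdl]; exact htlt)]
      by_cases hx : x = pvIdx n pq.1
      · subst hx
        rw [if_pos rfl, hdg (pvIdx n pq.1), pvPend_cons, if_pos rfl]
        push_cast
        ring
      · rw [if_neg hx, hdg x, pvPend_cons, if_neg (fun h => hx h.symm)]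
        simp
    have hcond : PySem.List.pyGetD (dg.set (pvIdx n pq.1) (dg.getD (pvIdx n pq.1) 0 - 1)) pq.1 0
        = ((pvCnt n deps (pvIdx n pq.1) P + pvPend n t (pvIdx n pq.1) : Nat) : Int) := by
      rw [pvGetD_idx hn _ pq.1 0 hlen' hib, hdgx (pvIdx n pq.1)]
    have hq3' : ∀ v ∈ qs, pvCnt n deps (pvIdx n v) P + pvPend n t (pvIdx n v) = 0 := by
      intro v hv
      have h0 := hq3 v hv
      rw [pvPend_cons] at h0
      omega
    have hunf : pvRelaxQ (pq :: t) (qs, dg) = pvRelaxQ t (pvStepB (qs, dg) pq) := rfl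
    by_cases hz : pvCnt n deps (pvIdx n pq.1) P + pvPend n t (pvIdx n pq.1) = 0
    · have hstep : pvStepB (qs, dg) pq
          = (qs ++ [pq.1], dg.set (pvIdx n pq.1) (dg.getD (pvIdx n pq.1) 0 - 1)) := by
        simp only [pvStepB]
        rw [hdg0, hcond, if_pos (by exact_mod_cast hz)]
      rw [hunf, hstep]
      apply ih (qs ++ [pq.1]) _ P (fun x hx => hes x (by simp [hx]))
      · intro v hv
        rcases List.mem_append.mp hv with h | h
        · exact hq1 v h
        · simp at h; subst h; exact hib
      · rw [List.map_append, ← List.append_assoc]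
        rw [List.nodup_append]
        refine ⟨hq2, by simp, ?_⟩
        intro a ha b hb
        simp at hb
        subst hb
        intro heq
        subst heq
        rcases List.mem_append.mp ha with h | h
        · exact hpq.2 h
        · obtain ⟨v, hv, hvv⟩ := List.mem_map.mp h
          have h0 := hq3 v hv
          rw [hvv, pvPend_cons] at h0
          simp at h0
      · intro v hv
        rcases List.mem_append.mp hv with h | h
        · exact hq3' v h
        · simp at h; subst h; exact hz
      · exact hlen'
      · exact hdgx
    · have hstep : pvStepB (qs, dg) pq
          = (qs, dg.set (pvIdx n pq.1) (dg.getD (pvIdx n pq.1) 0 - 1)) := by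
        simp only [pvStepB]
        rw [hdg0, hcond, if_neg (fun hc => hz (by exact_mod_cast hc))]
      rw [hunf, hstep]
      exact ih qs _ P (fun x hx => hes x (by simp [hx])) hq1 hq2 hq3' hlen' hdgx

-- ——— the master invariant: the pop sequence is a well-formed Kahn run ———
lemma pvPops_spec {n : Int} {deps : List (Int × Int × Int)} {g : List (List (Int × Int))}
    (hn : 0 ≤ n) (hp : pvPreE n deps)
    (hg : ∀ v : Int, pvInb n v → PySem.List.pyGetD g v [] = pvRowF n deps (pvIdx n v)) :
    ∀ (fuel : Nat) (qu dg : List Int) (P : List Nat),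
      (∀ v ∈ qu, pvInb n v) →
      (P ++ qu.map (pvIdx n)).Nodup →
      (∀ k : Nat, k < P.length → pvCnt n deps (P.getD k 0) (P.take k) = 0) →
      (∀ v ∈ qu, pvCnt n deps (pvIdx n v) P = 0) →
      dg.length = pvSz n →
      (∀ x : Nat, dg.getD x 0 = (pvCnt n deps x P : Int)) →
      pvRunOK n deps P (pvPops g fuel qu dg) := by
  intro fuel
  induction fuel with
  | zero => intro qu dg P _ _ _ _ _ _; trivial
  | succ f ih =>
    intro qu dg P hq1 hq2 hPz hq3 hdl hdg
    cases qu with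
    | nil => trivial
    | cons v qs =>
      have hvb : pvInb n v := hq1 v (by simp)
      have hvP : pvIdx n v ∉ P := by
        intro hc
        have hdisj := (List.nodup_append.mp hq2).2.2
        exact hdisj _ hc _ (by simp) rfl
      have hcv : pvCnt n deps (pvIdx n v) P = 0 := hq3 v (by simp)
      have htargets : ∀ pq ∈ pvRowF n deps (pvIdx n v),
          pvInb n pq.1 ∧ pvIdx n pq.1 ∉ P ∧ pvIdx n pq.1 ≠ pvIdx n v := by
        intro pq hpq
        obtain ⟨e, he, he1, he2, he3⟩ := pvRowF_mem hpq
        have hib : pvInb n pq.1 := by rw [← he1]; exact (hp e he).1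
        refine ⟨hib, ?_, ?_⟩
        · intro hcP
          obtain ⟨k, hk, hkeq⟩ := List.getElem_of_mem hcP
          have h0 := hPz k hk
          have hgd : P.getD k 0 = pvIdx n pq.1 := by
            rw [List.getD_eq_getElem P 0 hk, hkeq]
          rw [hgd] at h0
          have hsrc : pvIdx n e.2.1 ∈ P.take k :=
            pvCnt_zero h0 e he (by rw [he1])
          rw [he3] at hsrc
          exact hvP (List.mem_of_mem_take hsrc)
        · intro hceq
          have hsrc : pvIdx n e.2.1 ∈ P :=
            pvCnt_zero hcv e he (by rw [he1, hceq])
          rw [he3] at hsrc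
          exact hvP hsrc
      refine ⟨hvb, hvP, htargets, ?_⟩
      show pvRunOK n deps (P ++ [pvIdx n v])
        (pvPops g f (pvRelaxQ (PySem.List.pyGetD g v []) (qs, dg)).1
          (pvRelaxQ (PySem.List.pyGetD g v []) (qs, dg)).2)
      rw [hg v hvb]
      obtain ⟨r1, r2, r3, r4, r5⟩ := pvRelaxQ_spec (deps := deps) hn
        (pvRowF n deps (pvIdx n v)) qs dg (P ++ [pvIdx n v])
        (fun pq hpq => ⟨(htargets pq hpq).1, by
          intro hc
          rcases List.mem_append.mp hc with h | h
          · exact (htargets pq hpq).2.1 h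
          · exact (htargets pq hpq).2.2 (by simpa using h)⟩)
        (fun v' hv' => hq1 v' (by simp [hv']))
        (by simpa using hq2)
        (fun v' hv' => by
          have := pvCnt_snoc (n := n) (deps := deps) hvP (pvIdx n v')
          have h0 := hq3 v' (by simp [hv'])
          omega)
        hdl
        (fun x => by
          rw [hdg x, pvCnt_snoc (n := n) (deps := deps) hvP x])
      apply ih _ _ (P ++ [pvIdx n v]) r1 r2 ?_ r3 r4 r5
      intro k hk
      have hk2 : k < P.length + 1 := by simpa using hk
      by_cases hkP : k < P.length
      · have hgd : (P ++ [pvIdx n v]).getD k 0 = P.getD k 0 := by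
          rw [List.getD_eq_getElem _ 0 (by rw [List.length_append]; simp; omega)]
          rw [List.getElem_append_left hkP]
          rw [List.getD_eq_getElem P 0 hkP]
        have htk : (P ++ [pvIdx n v]).take k = P.take k :=
          List.take_append_of_le_length (by omega)
        rw [hgd, htk]
        exact hPz k hkP
      · have hkeq : k = P.length := by omega
        subst hkeq
        have hgd : (P ++ [pvIdx n v]).getD P.length 0 = pvIdx n v := by
          rw [List.getD_eq_getElem _ 0 (by simp)]
          simp
        have htk : (P ++ [pvIdx n v]).take P.length = P := by
          simp
        rw [hgd, htk]
        exact hcv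

-- ——— consequences of pvRunOK ———
lemma pvRunOK_inb {n : Int} {deps : List (Int × Int × Int)} :
    ∀ (L : List Int) (P : List Nat), pvRunOK n deps P L → ∀ u ∈ L, pvInb n u := by
  intro L
  induction L with
  | nil => intro P _ u hu; simp at hu
  | cons a t ih =>
    intro P h u hu
    obtain ⟨h1, h2, h3, h4⟩ := h
    rcases List.mem_cons.mp hu with rfl | hm
    · exact h1
    · exact ih _ h4 u hm

lemma pvRunOK_notP {n : Int} {deps : List (Int × Int × Int)} :
    ∀ (L : List Int) (P : List Nat), pvRunOK n deps P L → ∀ u ∈ L, pvIdx n u ∉ P := by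
  intro L
  induction L with
  | nil => intro P _ u hu; simp at hu
  | cons a t ih =>
    intro P h u hu
    obtain ⟨h1, h2, h3, h4⟩ := h
    rcases List.mem_cons.mp hu with rfl | hm
    · exact h2
    · intro hc
      exact ih _ h4 u hm (by simp [hc])

lemma pvRunOK_nodup {n : Int} {deps : List (Int × Int × Int)} :
    ∀ (L : List Int) (P : List Nat), pvRunOK n deps P L → (L.map (pvIdx n)).Nodup := by
  intro L
  induction L with
  | nil => intro P _; simp
  | cons a t ih =>
    intro P h
    obtain ⟨h1, h2, h3, h4⟩ := h
    rw [List.map_cons, List.nodup_cons]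
    refine ⟨?_, ih _ h4⟩
    intro hc
    obtain ⟨v, hv, hvv⟩ := List.mem_map.mp hc
    exact pvRunOK_notP t _ h4 v hv (by simp [hvv])

lemma pvRunOK_targets {n : Int} {deps : List (Int × Int × Int)} :
    ∀ (L : List Int) (P : List Nat), pvRunOK n deps P L →
      ∀ u ∈ L, ∀ pq ∈ pvRowF n deps (pvIdx n u), pvInb n pq.1 ∧ pvIdx n pq.1 ∉ P := by
  intro L
  induction L with
  | nil => intro P _ u hu; simp at hu
  | cons a t ih =>
    intro P h u hu pq hpq
    obtain ⟨h1, h2, h3, h4⟩ := h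
    rcases List.mem_cons.mp hu with rfl | hm
    · exact ⟨(h3 pq hpq).1, (h3 pq hpq).2.1⟩
    · have := ih _ h4 u hm pq hpq
      exact ⟨this.1, fun hc => this.2 (by simp [hc])⟩

-- ——— A's cost relaxation of one whole row, in closed form ———
lemma pvRelax_aux {n : Int} (hn : 0 ≤ n) (B : Nat) (praw uraw q : Int)
    (hpr : pvInb n praw) (hur : pvInb n uraw) (hne : pvIdx n praw ≠ pvIdx n uraw) :
    ∀ (t : Nat) (cs : List (List Int)), t ≤ B → cs.length = pvSz n → (∀ r ∈ cs, r.length = B) →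
      (((List.range t).map (fun k : Nat => (k : Int))).foldl (fun c i =>
        PySem.List.pySetD c praw (PySem.List.pySetD (PySem.List.pyGetD c praw []) i
          (PySem.List.pyGetD (PySem.List.pyGetD c praw []) i 0
            + PySem.List.pyGetD (PySem.List.pyGetD c uraw []) i 0 * q))) cs).length = pvSz n ∧
      (∀ r ∈ (((List.range t).map (fun k : Nat => (k : Int))).foldl (fun c i =>
        PySem.List.pySetD c praw (PySem.List.pySetD (PySem.List.pyGetD c praw []) i
          (PySem.List.pyGetD (PySem.List.pyGetD c praw []) i 0
            + PySem.List.pyGetD (PySem.List.pyGetD c uraw []) i 0 * q))) cs), r.length = B) ∧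
      (∀ y j : Nat, pvG2 (((List.range t).map (fun k : Nat => (k : Int))).foldl (fun c i =>
        PySem.List.pySetD c praw (PySem.List.pySetD (PySem.List.pyGetD c praw []) i
          (PySem.List.pyGetD (PySem.List.pyGetD c praw []) i 0
            + PySem.List.pyGetD (PySem.List.pyGetD c uraw []) i 0 * q))) cs) y j
        = if y = pvIdx n praw ∧ j < t then pvG2 cs y j + pvG2 cs (pvIdx n uraw) j * q
          else pvG2 cs y j) := by
  intro t
  induction t with
  | zero =>
    intro cs _ hcl hcr
    refine ⟨by simpa using hcl, by simpa using hcr, ?_⟩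
    intro y j
    simp
  | succ t ih =>
    intro cs ht hcl hcr
    obtain ⟨c1, c2, c3⟩ := ih cs (by omega) hcl hcr
    rw [List.range_succ, List.map_append, List.foldl_append]
    set prev := (((List.range t).map (fun k : Nat => (k : Int))).foldl (fun c i =>
        PySem.List.pySetD c praw (PySem.List.pySetD (PySem.List.pyGetD c praw []) i
          (PySem.List.pyGetD (PySem.List.pyGetD c praw []) i 0
            + PySem.List.pyGetD (PySem.List.pyGetD c uraw []) i 0 * q))) cs) with hprev
    simp only [List.map_cons, List.map_nil, List.foldl_cons, List.foldl_nil]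
    have hidxp := pvIdx_lt hn hpr
    have hidxu := pvIdx_lt hn hur
    have hrow : PySem.List.pyGetD prev praw [] = prev.getD (pvIdx n praw) [] :=
      pvGetD_idx hn prev praw [] c1 hpr
    have hrowu : PySem.List.pyGetD prev uraw [] = prev.getD (pvIdx n uraw) [] :=
      pvGetD_idx hn prev uraw [] c1 hur
    have hrlen : (prev.getD (pvIdx n praw) []).length = B := by
      rw [List.getD_eq_getElem _ _ (by omega)]
      exact c2 _ (List.getElem_mem _)
    rw [hrow, hrowu]
    simp only [PySem.List.pyGetD_natCast, PySem.List.pySetD_natCast]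
    rw [pvSetD_idx hn prev praw _ c1 hpr]
    refine ⟨by rw [List.length_set]; exact c1, ?_, ?_⟩
    · intro r hr
      rcases List.mem_or_eq_of_mem_set hr with h | h
      · exact c2 r h
      · rw [h, List.length_set]; exact hrlen
    · intro y j
      rw [pvG2_set_row prev (pvIdx n praw) _ y j (by omega)]
      by_cases hy : y = pvIdx n praw
      · rw [if_pos hy]
        rw [pvGetD_set (prev.getD (pvIdx n praw) []) t j _ 0 (by omega)]
        subst hy
        by_cases hj : j = t
        · subst hj
          rw [if_pos rfl, if_pos ⟨rfl, by omega⟩]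
          have e1 : pvG2 prev (pvIdx n praw) j = pvG2 cs (pvIdx n praw) j := by
            rw [c3]; simp
          have e2 : pvG2 prev (pvIdx n uraw) j = pvG2 cs (pvIdx n uraw) j := by
            rw [c3, if_neg]
            rintro ⟨h1, _⟩
            exact hne h1.symm
          show pvG2 prev (pvIdx n praw) j + pvG2 prev (pvIdx n uraw) j * q = _
          rw [e1, e2]
        · rw [if_neg hj]
          show pvG2 prev (pvIdx n praw) j = _
          rw [c3]
          by_cases hjt : j < t
          · rw [if_pos ⟨rfl, hjt⟩, if_pos ⟨rfl, by omega⟩]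
          · rw [if_neg (by rintro ⟨_, h⟩; exact hjt h), if_neg (by rintro ⟨_, h⟩; omega)]
      · rw [if_neg hy, c3]
        rw [if_neg (by rintro ⟨h, _⟩; exact hy h), if_neg (by rintro ⟨h, _⟩; exact hy h)]

lemma pvEdgeC_eval {n : Int} (hn : 0 ≤ n) (B : Nat) (u : Int) (pq : Int × Int)
    (hpr : pvInb n pq.1) (hur : pvInb n u) (hne : pvIdx n pq.1 ≠ pvIdx n u)
    (cs : List (List Int)) (hcl : cs.length = pvSz n) (hcr : ∀ r ∈ cs, r.length = B) :
    (pvEdgeC (B : Int) u cs pq).length = pvSz n ∧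
    (∀ r ∈ pvEdgeC (B : Int) u cs pq, r.length = B) ∧
    (∀ y j : Nat, pvG2 (pvEdgeC (B : Int) u cs pq) y j
        = if y = pvIdx n pq.1 ∧ j < B then pvG2 cs y j + pvG2 cs (pvIdx n u) j * pq.2
          else pvG2 cs y j) := by
  unfold pvEdgeC
  rw [PySem.List.pyRange_zero_nat]
  exact pvRelax_aux hn B pq.1 u pq.2 hpr hur hne B cs le_rfl hcl hcr

lemma pvRelaxC_spec {n : Int} (hn : 0 ≤ n) {B : Nat} {u : Int}
    (hur : pvInb n u) :
    ∀ (es : List (Int × Int)) (cs : List (List Int)),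
      cs.length = pvSz n → (∀ r ∈ cs, r.length = B) →
      (∀ pq ∈ es, pvInb n pq.1 ∧ pvIdx n pq.1 ≠ pvIdx n u) →
      (es.foldl (pvEdgeC (B : Int) u) cs).length = pvSz n ∧
      (∀ r ∈ es.foldl (pvEdgeC (B : Int) u) cs, r.length = B) ∧
      (∀ y j : Nat, j < B → pvG2 (es.foldl (pvEdgeC (B : Int) u) cs) y j
          = pvG2 cs y j + pvRowW n es y * pvG2 cs (pvIdx n u) j) := by
  intro es
  induction es with
  | nil =>
    intro cs hcl hcr _
    exact ⟨hcl, hcr, by intro y j hj; simp [pvRowW]⟩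
  | cons pq t ih =>
    intro cs hcl hcr hes
    have hpq := hes pq (by simp)
    obtain ⟨e1, e2, e3⟩ := pvEdgeC_eval hn B u pq hpq.1 hur hpq.2 cs hcl hcr
    rw [List.foldl_cons]
    obtain ⟨d1, d2, d3⟩ := ih (pvEdgeC (B : Int) u cs pq) e1 e2 (fun x hx => hes x (by simp [hx]))
    refine ⟨d1, d2, ?_⟩
    intro y j hj
    rw [d3 y j hj, pvRowW_cons]
    have hu2 : pvG2 (pvEdgeC (B : Int) u cs pq) (pvIdx n u) j = pvG2 cs (pvIdx n u) j := by
      rw [e3]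
      rw [if_neg]
      rintro ⟨h, _⟩
      exact hpq.2 h.symm
    rw [hu2, e3]
    by_cases hy : y = pvIdx n pq.1
    · rw [if_pos ⟨hy, hj⟩, if_pos hy.symm]
      ring
    · rw [if_neg (by rintro ⟨h, _⟩; exact hy h), if_neg (fun h => hy h.symm)]
      ring

-- ——— A's final cost matrix satisfies the flow equation over the run ———
lemma pvEA_freeze {n : Int} {deps : List (Int × Int × Int)} (hn : 0 ≤ n) {B : Nat} :
    ∀ (L : List Int) (P : List Nat) (cs : List (List Int)),
      pvRunOK n deps P L → cs.length = pvSz n → (∀ r ∈ cs, r.length = B) →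
      ∀ y ∈ P, ∀ j : Nat, j < B →
        pvG2 (L.foldl (fun cs u => (pvRowF n deps (pvIdx n u)).foldl (pvEdgeC (B : Int) u) cs) cs) y j
          = pvG2 cs y j := by
  intro L
  induction L with
  | nil => intro P cs _ _ _ y hy j hj; simp
  | cons u L' ih =>
    intro P cs h hcl hcr y hy j hj
    obtain ⟨h1, h2, h3, h4⟩ := h
    simp only [List.foldl_cons]
    obtain ⟨c1, c2, c3⟩ := pvRelaxC_spec hn h1 (pvRowF n deps (pvIdx n u)) cs hcl hcr
      (fun pq hpq => ⟨(h3 pq hpq).1, (h3 pq hpq).2.2⟩)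
    rw [ih _ _ h4 c1 c2 y (List.mem_append_left _ hy) j hj]
    rw [c3 y j hj, pvRowW_zero (fun pq hpq hc => (h3 pq hpq).2.1 (by rwa [hc]))]
    ring

lemma pvEA_fold {n : Int} {deps : List (Int × Int × Int)} (hn : 0 ≤ n) {B : Nat} :
    ∀ (L : List Int) (P : List Nat) (cs : List (List Int)),
      pvRunOK n deps P L → cs.length = pvSz n → (∀ r ∈ cs, r.length = B) →
      (L.foldl (fun cs u => (pvRowF n deps (pvIdx n u)).foldl (pvEdgeC (B : Int) u) cs) cs).length = pvSz n ∧
      (∀ r ∈ L.foldl (fun cs u => (pvRowF n deps (pvIdx n u)).foldl (pvEdgeC (B : Int) u) cs) cs, r.length = B) ∧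
      (∀ y j : Nat, j < B →
        pvG2 (L.foldl (fun cs u => (pvRowF n deps (pvIdx n u)).foldl (pvEdgeC (B : Int) u) cs) cs) y j
          = pvG2 cs y j + (L.map (fun u => pvRowW n (pvRowF n deps (pvIdx n u)) y *
              pvG2 (L.foldl (fun cs u => (pvRowF n deps (pvIdx n u)).foldl (pvEdgeC (B : Int) u) cs) cs) (pvIdx n u) j)).sum) := by
  intro L
  induction L with
  | nil => intro P cs _ hcl hcr; exact ⟨hcl, hcr, by intro y j hj; simp⟩
  | cons u L' ih =>
    intro P cs h hcl hcr
    obtain ⟨h1, h2, h3, h4⟩ := h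
    simp only [List.foldl_cons]
    obtain ⟨c1, c2, c3⟩ := pvRelaxC_spec hn h1 (pvRowF n deps (pvIdx n u)) cs hcl hcr
      (fun pq hpq => ⟨(h3 pq hpq).1, (h3 pq hpq).2.2⟩)
    obtain ⟨d1, d2, d3⟩ := ih _ _ h4 c1 c2
    refine ⟨d1, d2, ?_⟩
    intro y j hj
    rw [d3 y j hj, c3 y j hj, List.map_cons, List.sum_cons]
    have hfrozen : pvG2 (L'.foldl (fun cs u => (pvRowF n deps (pvIdx n u)).foldl (pvEdgeC (B : Int) u) cs)
          ((pvRowF n deps (pvIdx n u)).foldl (pvEdgeC (B : Int) u) cs)) (pvIdx n u) j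
        = pvG2 cs (pvIdx n u) j := by
      rw [pvEA_freeze hn L' (P ++ [pvIdx n u]) _ h4 c1 c2 (pvIdx n u) (by simp) j hj]
      rw [c3 (pvIdx n u) j hj, pvRowW_zero (fun pq hpq hc => (h3 pq hpq).2.2 hc)]
      ring
    rw [hfrozen]
    ring

-- ——— the initial unit-vector cost matrix of A ———
lemma pvInit_aux {n : Int} (hn : 0 ≤ n) (B : Nat) :
    ∀ (l : List Int) (s : Nat) (c : List (List Int)),
      (∀ v ∈ l, 1 ≤ v ∧ v ≤ n) → s + l.length ≤ B →
      c.length = pvSz n → (∀ r ∈ c, r.length = B) →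
      ((PySem.List.enumerate l (s : Int)).foldl (fun c ip =>
        PySem.List.pySetD c ip.2 (PySem.List.pySetD (PySem.List.pyGetD c ip.2 []) ip.1 1)) c).length = pvSz n ∧
      (∀ r ∈ ((PySem.List.enumerate l (s : Int)).foldl (fun c ip =>
        PySem.List.pySetD c ip.2 (PySem.List.pySetD (PySem.List.pyGetD c ip.2 []) ip.1 1)) c), r.length = B) ∧
      (∀ y j : Nat, pvG2 ((PySem.List.enumerate l (s : Int)).foldl (fun c ip =>
        PySem.List.pySetD c ip.2 (PySem.List.pySetD (PySem.List.pyGetD c ip.2 []) ip.1 1)) c) y j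
        = if s ≤ j ∧ j < s + l.length ∧ (l.getD (j - s) 0).toNat = y then 1 else pvG2 c y j) := by
  intro l
  induction l with
  | nil =>
    intro s c _ _ hcl hcr
    refine ⟨by simpa [PySem.List.enumerate] using hcl, by simpa [PySem.List.enumerate] using hcr, ?_⟩
    intro y j
    simp [PySem.List.enumerate]
    omega
  | cons v t ih =>
    intro s c hall hsl hcl hcr
    have hv := hall v (by simp)
    have hvb : pvInb n v := ⟨by omega, by omega⟩
    have hvlt := pvIdx_lt hn hvb
    rw [PySem.List.enumerate_cons, List.foldl_cons]
    have hrow : PySem.List.pyGetD c v [] = c.getD (pvIdx n v) [] := pvGetD_idx hn c v [] hcl hvb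
    have hrlen : (c.getD (pvIdx n v) []).length = B := by
      rw [List.getD_eq_getElem _ _ (by omega)]
      exact hcr _ (List.getElem_mem _)
    have hslt : s < B := by simp at hsl; omega
    have hstep : PySem.List.pySetD c v
          (PySem.List.pySetD (PySem.List.pyGetD c v []) (s : Int) 1)
        = c.set (pvIdx n v) ((c.getD (pvIdx n v) []).set s 1) := by
      rw [hrow, PySem.List.pySetD_natCast, pvSetD_idx hn c v _ hcl hvb]
    have hs1 : ((s : Int) + 1) = ((s + 1 : Nat) : Int) := by push_cast; ring
    rw [hstep, hs1]
    have hcl' : (c.set (pvIdx n v) ((c.getD (pvIdx n v) []).set s 1)).length = pvSz n := by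
      rw [List.length_set]; exact hcl
    have hcr' : ∀ r ∈ c.set (pvIdx n v) ((c.getD (pvIdx n v) []).set s 1), r.length = B := by
      intro r hr
      rcases List.mem_or_eq_of_mem_set hr with h | h
      · exact hcr r h
      · rw [h, List.length_set]; exact hrlen
    obtain ⟨d1, d2, d3⟩ := ih (s + 1) _ (fun x hx => hall x (by simp [hx])) (by simp at hsl ⊢; omega) hcl' hcr'
    refine ⟨d1, d2, ?_⟩
    intro y j
    rw [d3 y j]
    have hbase : pvG2 (c.set (pvIdx n v) ((c.getD (pvIdx n v) []).set s 1)) y j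
        = if y = pvIdx n v ∧ j = s then 1 else pvG2 c y j := by
      rw [pvG2_set_row c (pvIdx n v) _ y j (by omega)]
      by_cases hy : y = pvIdx n v
      · rw [if_pos hy]
        rw [pvGetD_set (c.getD (pvIdx n v) []) s j 1 0 (by omega)]
        by_cases hj : j = s
        · rw [if_pos hj, if_pos ⟨hy, hj⟩]
        · rw [if_neg hj, if_neg (by rintro ⟨_, h⟩; exact hj h)]
          rw [hy]
          rfl
      · rw [if_neg hy, if_neg (by rintro ⟨h, _⟩; exact hy h)]
    rw [hbase]
    have hidxv : pvIdx n v = v.toNat := pvIdx_nonneg_eq (by omega)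
    by_cases hin : s + 1 ≤ j ∧ j < s + 1 + t.length ∧ (t.getD (j - (s + 1)) 0).toNat = y
    · rw [if_pos hin]
      have hget : (v :: t).getD (j - s) 0 = t.getD (j - (s + 1)) 0 := by
        obtain ⟨m, hm⟩ : ∃ m, j - s = m + 1 := ⟨j - s - 1, by omega⟩
        have hm2 : m = j - (s + 1) := by omega
        rw [hm, List.getD_cons_succ, hm2]
      rw [if_pos ⟨by omega, by simp only [List.length_cons]; omega, by rw [hget]; exact hin.2.2⟩]
    · rw [if_neg hin]
      by_cases hj : j = s
      · rw [hj]
        by_cases hy : y = pvIdx n v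
        · have h3 : ((v :: t).getD (s - s) 0).toNat = y := by
            have hss : s - s = 0 := by omega
            rw [hss, List.getD_cons_zero, hy, hidxv]
          rw [if_pos ⟨hy, rfl⟩, if_pos ⟨le_rfl, by simp only [List.length_cons]; omega, h3⟩]
        · rw [if_neg (by rintro ⟨h, _⟩; exact hy h)]
          rw [if_neg ?_]
          rintro ⟨_, _, h3⟩
          have hss : s - s = 0 := by omega
          rw [hss, List.getD_cons_zero] at h3
          apply hy
          rw [hidxv]
          omega
      · rw [if_neg (by rintro ⟨_, h⟩; exact hj h)]
        rw [if_neg ?_]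
        rintro ⟨g1, g2, g3⟩
        apply hin
        have hjs : s + 1 ≤ j := by omega
        refine ⟨hjs, by simp only [List.length_cons] at g2 ⊢; omega, ?_⟩
        have hget : (v :: t).getD (j - s) 0 = t.getD (j - (s + 1)) 0 := by
          obtain ⟨m, hm⟩ : ∃ m, j - s = m + 1 := ⟨j - s - 1, by omega⟩
          have hm2 : m = j - (s + 1) := by omega
          rw [hm, List.getD_cons_succ, hm2]
        rw [← hget]
        exact g3

-- ——— B's final need array satisfies the backward equation over the run ———
def pvNeedStep (g : List (List (Int × Int))) (nd : List Int) (v : Int) : List Int :=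
  PySem.List.pySetD nd v (PySem.List.pyGetD nd v 0 +
    ((PySem.List.pyGetD g v []).map (fun pq => pq.2 * PySem.List.pyGetD nd pq.1 0)).sum)

lemma pvEB_fold {n : Int} {deps : List (Int × Int × Int)} {g : List (List (Int × Int))}
    (hn : 0 ≤ n) (hp : pvPreE n deps)
    (hg : ∀ v : Int, pvInb n v → PySem.List.pyGetD g v [] = pvRowF n deps (pvIdx n v)) :
    ∀ (L : List Int) (P : List Nat) (nd : List Int),
      pvRunOK n deps P L → nd.length = pvSz n →
      (L.reverse.foldl (pvNeedStep g) nd).length = pvSz n ∧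
      (∀ x : Nat, x ∉ L.map (pvIdx n) →
        (L.reverse.foldl (pvNeedStep g) nd).getD x 0 = nd.getD x 0) ∧
      (∀ u ∈ L,
        (L.reverse.foldl (pvNeedStep g) nd).getD (pvIdx n u) 0
          = nd.getD (pvIdx n u) 0 +
            ((pvRowF n deps (pvIdx n u)).map (fun pq => pq.2 *
              (L.reverse.foldl (pvNeedStep g) nd).getD (pvIdx n pq.1) 0)).sum) := by
  intro L
  induction L with
  | nil =>
    intro P nd _ hl
    refine ⟨by simpa, fun x _ => rfl, by simp⟩
  | cons u L' ih =>
    intro P nd h hl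
    obtain ⟨h1, h2, h3, h4⟩ := h
    have hnotP := pvRunOK_notP L' _ h4
    have htg := pvRunOK_targets L' _ h4
    rw [List.reverse_cons, List.foldl_append]
    obtain ⟨d1, d2, d3⟩ := ih _ nd h4 hl
    set nd2 := L'.reverse.foldl (pvNeedStep g) nd with hnd2
    have hixu := pvIdx_lt hn h1
    have hixu_not : pvIdx n u ∉ L'.map (pvIdx n) := by
      intro hc
      obtain ⟨v, hv, hvv⟩ := List.mem_map.mp hc
      exact hnotP v hv (by simp [hvv])
    have hmapeq : ((pvRowF n deps (pvIdx n u)).map (fun pq => pq.2 * PySem.List.pyGetD nd2 pq.1 0))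
        = ((pvRowF n deps (pvIdx n u)).map (fun pq => pq.2 * nd2.getD (pvIdx n pq.1) 0)) :=
      List.map_congr_left (fun pq hpq => by rw [pvGetD_idx hn nd2 pq.1 0 d1 (h3 pq hpq).1])
    have hstep : List.foldl (pvNeedStep g) nd2 [u]
        = nd2.set (pvIdx n u) (nd2.getD (pvIdx n u) 0 +
            ((pvRowF n deps (pvIdx n u)).map (fun pq => pq.2 * nd2.getD (pvIdx n pq.1) 0)).sum) := by
      show pvNeedStep g nd2 u = _
      unfold pvNeedStep
      rw [hg u h1, hmapeq, pvGetD_idx hn nd2 u 0 d1 h1, pvSetD_idx hn nd2 u _ d1 h1]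
    rw [hstep]
    set val := nd2.getD (pvIdx n u) 0 +
        ((pvRowF n deps (pvIdx n u)).map (fun pq => pq.2 * nd2.getD (pvIdx n pq.1) 0)).sum with hval
    have hlen2 : (pvIdx n u) < nd2.length := by rw [d1]; exact hixu
    refine ⟨by rw [List.length_set]; exact d1, ?_, ?_⟩
    · intro x hx
      rw [List.map_cons] at hx
      have hx1 : x ≠ pvIdx n u := fun hc => hx (by simp [hc])
      have hx2 : x ∉ L'.map (pvIdx n) := fun hc => hx (by simp [hc])
      rw [pvGetD_set nd2 (pvIdx n u) x val 0 hlen2, if_neg hx1]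
      exact d2 x hx2
    · have hFt : ∀ t : Nat, t ≠ pvIdx n u → (nd2.set (pvIdx n u) val).getD t 0 = nd2.getD t 0 := by
        intro t htne
        rw [pvGetD_set nd2 (pvIdx n u) t val 0 hlen2, if_neg htne]
      intro w hw
      rcases List.mem_cons.mp hw with rfl | hm
      · have hs : (pvRowF n deps (pvIdx n w)).map
              (fun pq => pq.2 * (nd2.set (pvIdx n w) val).getD (pvIdx n pq.1) 0)
            = (pvRowF n deps (pvIdx n w)).map (fun pq => pq.2 * nd2.getD (pvIdx n pq.1) 0) :=
          List.map_congr_left (fun pq hpq => by rw [hFt _ (h3 pq hpq).2.2])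
        rw [hs, pvGetD_set nd2 (pvIdx n w) (pvIdx n w) val 0 hlen2, if_pos rfl, hval,
          d2 (pvIdx n w) hixu_not]
      · have hne : pvIdx n w ≠ pvIdx n u := by
          intro hc
          exact hnotP w hm (by simp [hc])
        have hs : (pvRowF n deps (pvIdx n w)).map
              (fun pq => pq.2 * (nd2.set (pvIdx n u) val).getD (pvIdx n pq.1) 0)
            = (pvRowF n deps (pvIdx n w)).map (fun pq => pq.2 * nd2.getD (pvIdx n pq.1) 0) := by
          apply List.map_congr_left
          intro pq hpq
          have htne : pvIdx n pq.1 ≠ pvIdx n u := by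
            intro hc
            exact (htg w hm pq hpq).2 (by simp [hc])
          rw [hFt _ htne]
        rw [hs, hFt _ hne, d3 w hm]

-- ——— small sum lemmas ———
lemma pvSum_map_sub {α : Type} (l : List α) (f h : α → Int) :
    (l.map (fun a => f a - h a)).sum = (l.map f).sum - (l.map h).sum := by
  induction l with
  | nil => simp
  | cons a t ih => simp [ih]; ring

lemma pvSum_swap {α : Type} (l : List α) (s : Finset Nat) (g : α → Nat → Int) :
    (l.map (fun a => ∑ x ∈ s, g a x)).sum = ∑ x ∈ s, (l.map (fun a => g a x)).sum := by
  induction l with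
  | nil => simp
  | cons a t ih => simp [ih, Finset.sum_add_distrib]

lemma pvSum_onehot (l : List Nat) (hl : l.Nodup) (F : Nat → Int) (N : Nat) :
    (l.map (fun x => F x * (if x = N then 1 else 0))).sum = if N ∈ l then F N else 0 := by
  induction l with
  | nil => simp
  | cons a t ih =>
    have hna : a ∉ t := (List.nodup_cons.mp hl).1
    have ht := ih (List.nodup_cons.mp hl).2
    rw [List.map_cons, List.sum_cons, ht]
    by_cases ha : a = N
    · subst ha
      rw [if_pos rfl, if_neg hna, if_pos (by simp)]
      ring
    · by_cases hm : N ∈ t <;> simp [hm, ha, Ne.symm ha]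

-- ——— the telescoping identity: backward scalar need equals forward vector count ———
def pvRW (es : List (Nat × Int)) (x : Nat) : Int :=
  ((es.filter (fun e => e.1 == x)).map (fun e => e.2)).sum

lemma pvRW_cons (e : Nat × Int) (t : List (Nat × Int)) (x : Nat) :
    pvRW (e :: t) x = (if e.1 = x then e.2 else 0) + pvRW t x := by
  unfold pvRW
  by_cases hx : e.1 = x <;> simp [List.filter_cons, hx]

lemma pvKey1 (sz : Nat) (W : Nat → Int) :
    ∀ (es : List (Nat × Int)), (∀ e ∈ es, e.1 < sz) →
      (es.map (fun e => e.2 * W e.1)).sum = ∑ x ∈ Finset.range sz, pvRW es x * W x := by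
  intro es
  induction es with
  | nil => simp [pvRW]
  | cons e t ih =>
    intro h
    have ht := ih (fun a ha => h a (by simp [ha]))
    rw [List.map_cons, List.sum_cons, ht]
    have hsplit : ∀ x : Nat, pvRW (e :: t) x * W x
        = (if x = e.1 then e.2 * W e.1 else 0) + pvRW t x * W x := by
      intro x
      rw [pvRW_cons]
      by_cases hx : x = e.1
      · subst hx
        rw [if_pos rfl, if_pos rfl]
        ring
      · rw [if_neg (fun hc => hx hc.symm), if_neg hx]
        ring
    rw [Finset.sum_congr rfl (fun x _ => hsplit x), Finset.sum_add_distrib,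
      Finset.sum_ite_eq' (Finset.range sz) e.1 (fun _ => e.2 * W e.1),
      if_pos (Finset.mem_range.mpr (h e (by simp)))]

lemma pvTelescope (sz : Nat) (row : Nat → List (Nat × Int)) (l : List Nat) (F W : Nat → Int)
    (N Bi : Nat) (hN : N < sz) (hBi : Bi < sz) (hl : l.Nodup) (hlsz : ∀ w ∈ l, w < sz)
    (ht : ∀ w ∈ l, ∀ e ∈ row w, e.1 < sz)
    (hA : ∀ x : Nat, F x = (if x = Bi then 1 else 0) + (l.map (fun w => pvRW (row w) x * F w)).sum)
    (hB : ∀ w ∈ l, W w = (if w = N then 1 else 0) + ((row w).map (fun e => e.2 * W e.1)).sum)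
    (hW0 : ∀ x : Nat, x < sz → x ∉ l → W x = (if x = N then 1 else 0)) :
    W Bi = F N := by
  have hway1 : (l.map (fun w => F w * ((row w).map (fun e => e.2 * W e.1)).sum)).sum
      = (l.map (fun w => F w * W w)).sum - (if N ∈ l then F N else 0) := by
    rw [List.map_congr_left (fun w hw => show F w * ((row w).map (fun e => e.2 * W e.1)).sum
        = F w * W w - F w * (if w = N then 1 else 0) by rw [hB w hw]; ring)]
    rw [pvSum_map_sub l (fun w => F w * W w) (fun w => F w * (if w = N then 1 else 0))]
    rw [pvSum_onehot l hl F N]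
  have hway2 : (l.map (fun w => F w * ((row w).map (fun e => e.2 * W e.1)).sum)).sum
      = (∑ x ∈ Finset.range sz, F x * W x) - W Bi := by
    rw [List.map_congr_left (fun w hw => by rw [pvKey1 sz W (row w) (ht w hw), Finset.mul_sum])]
    rw [pvSum_swap l (Finset.range sz) (fun w x => F w * (pvRW (row w) x * W x))]
    have hfac : ∀ x ∈ Finset.range sz,
        (l.map (fun w => F w * (pvRW (row w) x * W x))).sum
          = (F x - (if x = Bi then 1 else 0)) * W x := by
      intro x _
      have h1 : (l.map (fun w => F w * (pvRW (row w) x * W x))).sum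
          = (l.map (fun w => pvRW (row w) x * F w)).sum * W x := by
        rw [← List.sum_map_mul_right]
        congr 1
        apply List.map_congr_left
        intro w _
        ring
      have h2 : (l.map (fun w => pvRW (row w) x * F w)).sum
          = F x - (if x = Bi then 1 else 0) := by linarith [hA x]
      rw [h1, h2]
    rw [Finset.sum_congr rfl hfac]
    rw [Finset.sum_congr rfl (fun x _ => sub_mul (F x) _ (W x))]
    rw [Finset.sum_sub_distrib]
    congr 1
    rw [Finset.sum_congr rfl (fun x _ => show (if x = Bi then 1 else 0) * W x
        = if x = Bi then W x else 0 by split <;> simp)]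
    rw [Finset.sum_ite_eq' (Finset.range sz) Bi W, if_pos (Finset.mem_range.mpr hBi)]
  have hsub : l.toFinset ⊆ Finset.range sz := by
    intro x hx
    exact Finset.mem_range.mpr (hlsz x (List.mem_toFinset.mp hx))
  have hsplit : ∑ x ∈ Finset.range sz, F x * W x
      = (∑ x ∈ Finset.range sz \ l.toFinset, F x * W x) + (l.map (fun w => F w * W w)).sum := by
    rw [← Finset.sum_sdiff hsub, List.sum_toFinset _ hl]
  have hout : (∑ x ∈ Finset.range sz \ l.toFinset, F x * W x)
      = if N ∈ l then 0 else F N := by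
    have hterm : ∀ x ∈ Finset.range sz \ l.toFinset, F x * W x = if x = N then F x else 0 := by
      intro x hx
      obtain ⟨hx1, hx2⟩ := Finset.mem_sdiff.mp hx
      rw [hW0 x (Finset.mem_range.mp hx1) (fun hc => hx2 (List.mem_toFinset.mpr hc))]
      by_cases hxx : x = N
      · subst hxx; simp
      · simp [hxx]
    rw [Finset.sum_congr rfl hterm, Finset.sum_ite_eq' _ N F]
    by_cases hNl : N ∈ l
    · rw [if_neg (fun hc => (Finset.mem_sdiff.mp hc).2 (List.mem_toFinset.mpr hNl)), if_pos hNl]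
    · rw [if_pos (Finset.mem_sdiff.mpr ⟨Finset.mem_range.mpr hN,
        fun hc => hNl (List.mem_toFinset.mp hc)⟩), if_neg hNl]
  rw [hway2, hsplit, hout] at hway1
  by_cases hNl : N ∈ l
  · rw [if_pos hNl, if_pos hNl] at hway1
    linarith
  · rw [if_neg hNl, if_neg hNl] at hway1
    linarith

-- ——— bridges for the final assembly ———
lemma pvRowW_RW (n : Int) (es : List (Int × Int)) (x : Nat) :
    pvRowW n es x = pvRW (es.map (fun pq => (pvIdx n pq.1, pq.2))) x := by
  induction es with
  | nil => simp [pvRowW, pvRW]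
  | cons pq t ih =>
    rw [pvRowW_cons, List.map_cons, pvRW_cons, ih]

lemma pvGetD_replicate_zero (m x : Nat) : (List.replicate m (0 : Int)).getD x 0 = 0 := by
  by_cases h : x < m <;> simp [List.getD, List.getElem?_replicate, h]

lemma pvG2_replicate (m B y j : Nat) :
    pvG2 (List.replicate m (List.replicate B (0 : Int))) y j = 0 := by
  unfold pvG2
  by_cases h : y < m
  · rw [List.getD_eq_getElem _ [] (by simpa using h)]
    simp [pvGetD_replicate_zero]
  · rw [List.getD_eq_default _ [] (by simpa using Nat.le_of_not_lt h)]
    simp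

lemma pvFoldl_rows_congr {n : Int} {deps : List (Int × Int × Int)} (g : List (List (Int × Int)))
    (nb : Int) (hg : ∀ v : Int, pvInb n v → PySem.List.pyGetD g v [] = pvRowF n deps (pvIdx n v)) :
    ∀ (L : List Int) (cs : List (List Int)), (∀ u ∈ L, pvInb n u) →
      L.foldl (fun cs u => (PySem.List.pyGetD g u []).foldl (pvEdgeC nb u) cs) cs
        = L.foldl (fun cs u => (pvRowF n deps (pvIdx n u)).foldl (pvEdgeC nb u) cs) cs := by
  intro L
  induction L with
  | nil => intro cs _; rfl
  | cons u t ih =>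
    intro cs h
    simp only [List.foldl_cons]
    rw [hg u (h u (by simp))]
    exact ih _ (fun v hv => h v (by simp [hv]))

-- ===== VERDICT (by name: the statement is the Claim_ definition above) =====
theorem get_product_costs_spec : Claim_equal_get_product_costs := by
  intro n deps _ hpre
  obtain ⟨hn, hpre2⟩ := hpre
  have hp : pvPreE n deps := fun e he =>
    ⟨⟨(hpre2 e he).1, (hpre2 e he).2.1⟩, (hpre2 e he).2.2.1, (hpre2 e he).2.2.2⟩
  show get_product_costs n deps = get_product_costs_alt n deps
  obtain ⟨hg1, hg2, hg3, hg4⟩ := pvBuildA_spec hn hp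
  have hg : ∀ v : Int, pvInb n v → PySem.List.pyGetD (pvBuildA n deps).1 v []
      = pvRowF n deps (pvIdx n v) := by
    intro v hv
    rw [pvGetD_idx hn _ v [] hg1 hv, hg3]
  simp only [get_product_costs, get_product_costs_alt, pvBP_eq hn hp]
  have hnin : pvInb n n := ⟨by omega, le_refl n⟩
  have hNlt : n.toNat < pvSz n := by unfold pvSz; omega
  have hixn : pvIdx n n = n.toNat := pvIdx_nonneg_eq hn
  have hbpinb : ∀ v ∈ pvBP n deps, pvInb n v := by
    intro v hv
    have := pvBP_mem hv
    exact ⟨by omega, by omega⟩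
  -- the shared Kahn run
  have hrun : pvRunOK n deps []
      (pvPops (pvBuildA n deps).1 (n.toNat + deps.length + 1) (pvBP n deps) (pvBuildA n deps).2) := by
    apply pvPops_spec hn hp hg (n.toNat + deps.length + 1) (pvBP n deps) _ []
    · exact hbpinb
    · simpa using pvBP_map_nodup (n := n) (deps := deps)
    · intro k hk; simp at hk
    · intro v hv
      rw [pvBP_idx hv]
      exact (pvBP_mem hv).2.2
    · exact hg2
    · exact hg4
  set L := pvPops (pvBuildA n deps).1 (n.toNat + deps.length + 1) (pvBP n deps) (pvBuildA n deps).2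
    with hLdef
  have hLinb := pvRunOK_inb L [] hrun
  have hLnodup := pvRunOK_nodup L [] hrun
  set bp := pvBP n deps with hbpdef
  set B := bp.length with hBdef
  -- A side: initial matrix
  have hc0len : (List.replicate (n + 1).toNat (List.replicate B (0 : Int))).length = pvSz n := by
    simp [pvSz]
  have hc0rows : ∀ r ∈ List.replicate (n + 1).toNat (List.replicate B (0 : Int)), r.length = B := by
    intro r hr
    rw [List.eq_of_mem_replicate hr]
    simp
  have hinit := pvInit_aux hn B bp 0 (List.replicate (n + 1).toNat (List.replicate B (0 : Int)))
    (fun v hv => by have := pvBP_mem hv; exact ⟨this.1, this.2.1⟩) (by omega) hc0len hc0rows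
  simp only [Nat.cast_zero] at hinit
  obtain ⟨hc1len, hc1rows, hc1val⟩ := hinit
  set cost1 := (PySem.List.enumerate bp 0).foldl (fun c ip =>
      PySem.List.pySetD c ip.2 (PySem.List.pySetD (PySem.List.pyGetD c ip.2 []) ip.1 1))
      (List.replicate (n + 1).toNat (List.replicate B (0 : Int))) with hc1def
  have hInit : ∀ y j : Nat, j < B → pvG2 cost1 y j
      = if j < B ∧ (bp.getD j 0).toNat = y then 1 else 0 := by
    intro y j hj
    rw [hc1val y j]
    by_cases hcond : 0 ≤ j ∧ j < 0 + bp.length ∧ (bp.getD (j - 0) 0).toNat = y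
    · rw [if_pos hcond, if_pos ⟨hj, by simpa using hcond.2.2⟩]
    · rw [if_neg hcond, if_neg (fun hc => hcond ⟨by omega, by simpa using hj, by simpa using hc.2⟩),
        pvG2_replicate]
  -- A side: the BFS equals the run fold
  rw [pvBfsA_pops (pvBuildA n deps).1 (B : Int) (n.toNat + deps.length + 1) bp (pvBuildA n deps).2 cost1]
  rw [pvFoldl_rows_congr (pvBuildA n deps).1 (B : Int) hg L cost1 hLinb]
  set costF := L.foldl (fun cs u => (pvRowF n deps (pvIdx n u)).foldl (pvEdgeC (B : Int) u) cs) cost1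
    with hcostFdef
  obtain ⟨hFlen, hFrows, hAeq⟩ := pvEA_fold hn L [] cost1 hrun hc1len hc1rows
  -- B side
  rw [pvBfsB_pops (pvBuildA n deps).1 (n.toNat + deps.length + 1) bp (pvBuildA n deps).2 []]
  rw [List.nil_append]
  have hstepeq : (fun nd v => PySem.List.pySetD nd v (PySem.List.pyGetD nd v 0 +
      ((PySem.List.pyGetD (pvBuildA n deps).1 v []).map
        (fun pq => pq.2 * PySem.List.pyGetD nd pq.1 0)).sum))
      = pvNeedStep (pvBuildA n deps).1 := rfl
  rw [hstepeq]
  have hrep0 : (List.replicate (n + 1).toNat (0 : Int)).length = pvSz n := by simp [pvSz]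
  have hneed0 : PySem.List.pySetD (List.replicate (n + 1).toNat (0 : Int)) n 1
      = (List.replicate (n + 1).toNat (0 : Int)).set n.toNat 1 := by
    rw [pvSetD_idx hn _ n 1 hrep0 hnin, hixn]
  rw [hneed0]
  set need0 := (List.replicate (n + 1).toNat (0 : Int)).set n.toNat 1 with hneed0def
  have hneed0len : need0.length = pvSz n := by
    rw [hneed0def, List.length_set]
    exact hrep0
  have hN0 : ∀ x : Nat, need0.getD x 0 = if x = n.toNat then 1 else 0 := by
    intro x
    rw [hneed0def, pvGetD_set _ n.toNat x 1 0 (by rw [hrep0]; exact hNlt)]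
    by_cases hx : x = n.toNat
    · rw [if_pos hx, if_pos hx]
    · rw [if_neg hx, if_neg hx, pvGetD_replicate_zero]
  obtain ⟨hnlen, hnout, hnval⟩ := pvEB_fold hn hp hg L [] need0 hrun hneed0len
  set need := L.reverse.foldl (pvNeedStep (pvBuildA n deps).1) need0 with hneeddef
  -- compare the two result lists elementwise
  apply List.ext_getElem
  · rw [List.length_map, List.length_map, PySem.List.length_pyRange_one]
    omega
  intro k hk1 hk2
  rw [List.length_map, PySem.List.length_pyRange_one] at hk1
  have hkB : k < B := by omega
  have hbpk : bp.getD k 0 = bp[k] := List.getD_eq_getElem bp 0 (by omega)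
  have hbkmem : bp[k] ∈ bp := List.getElem_mem _
  have hbkinb : pvInb n bp[k] := hbpinb _ hbkmem
  have hbkidx : pvIdx n bp[k] = (bp[k]).toNat := pvBP_idx hbkmem
  rw [List.getElem_map, List.getElem_map]
  rw [PySem.List.getElem_pyRange_one 0 (B : Int) k (by rw [PySem.List.length_pyRange_one]; omega)]
  have hrowA : PySem.List.pyGetD costF n [] = costF.getD n.toNat [] := by
    rw [pvGetD_idx hn costF n [] hFlen hnin, hixn]
  have hfst : PySem.List.pyGetD bp (0 + (k : Int)) 0 = bp[k] := by
    rw [zero_add, PySem.List.pyGetD_natCast, hbpk]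
  have hsnd : PySem.List.pyGetD (PySem.List.pyGetD costF n []) (0 + (k : Int)) 0
      = pvG2 costF n.toNat k := by
    rw [zero_add, hrowA, PySem.List.pyGetD_natCast]
    rfl
  rw [hfst, hsnd]
  have hneedk : PySem.List.pyGetD need bp[k] 0 = need.getD (pvIdx n bp[k]) 0 :=
    pvGetD_idx hn need bp[k] 0 hnlen hbkinb
  rw [hneedk]
  -- the telescoping identity at column k
  have htele := pvTelescope (pvSz n)
    (fun w => (pvRowF n deps w).map (fun pq => (pvIdx n pq.1, pq.2)))
    (L.map (pvIdx n))
    (fun x => pvG2 costF x k) (fun x => need.getD x 0)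
    n.toNat (pvIdx n bp[k]) hNlt (pvIdx_lt hn hbkinb) hLnodup
    (by
      intro w hw
      obtain ⟨u, hu, huw⟩ := List.mem_map.mp hw
      rw [← huw]
      exact pvIdx_lt hn (hLinb u hu))
    (by
      intro w _ e he
      obtain ⟨pq, hpq, hpqe⟩ := List.mem_map.mp he
      rw [← hpqe]
      exact pvIdx_lt hn (pvRowF_inb hp hpq))
    (by
      intro x
      dsimp only
      rw [hAeq x k hkB, hInit x k hkB]
      have hiff : (k < B ∧ (bp.getD k 0).toNat = x) ↔ x = pvIdx n bp[k] := by
        rw [hbkidx, hbpk]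
        constructor
        · rintro ⟨_, h⟩; omega
        · intro h; exact ⟨hkB, h.symm⟩
      rw [if_congr hiff rfl rfl]
      congr 1
      rw [List.map_map]
      apply congrArg List.sum
      apply List.map_congr_left
      intro u _
      show pvRowW n (pvRowF n deps (pvIdx n u)) x * pvG2 costF (pvIdx n u) k = _
      rw [pvRowW_RW]
      rfl)
    (by
      intro w hw
      dsimp only
      obtain ⟨u, hu, huw⟩ := List.mem_map.mp hw
      rw [← huw, hnval u hu, hN0 (pvIdx n u)]
      congr 1
      rw [List.map_map]
      rfl)
    (by
      intro x _ hx
      dsimp only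
      rw [hnout x hx, hN0 x])
  have htele' : need.getD (pvIdx n bp[k]) 0 = pvG2 costF n.toNat k := htele
  rw [htele']
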